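-- pv_equiv track=rewrite | github.com/edt-yxz-zzd/python3_src | nn_ns/RMQ/LeftBiasedRMQ/array_to_idx2left_biased_rmq_control_range.py | array_to_idx2left_biased_rmq_control_range
-- ===== SOURCE A (Python) =====
-- def array_to_idx2left_biased_rmq_control_range(array):
--     '''Ord a => [a] -> [(ArrayIdx, ArrayIdx)]
--
-- what?
--     [(I,J) == array_idx2left_biased_rmq_control_range<array>(k)]
--         ==>> [[k == lb_RMQ<array>(i, j)] <==> [I <= i <= k < j <= J]]
-- why?
--     use to verify left_biased_RMQ algorithm
--         O(1)
--     how to verify?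
--         see: VerifyLeftBiasedRMQ
--
-- time and space:
--     time O(L)*(a."<" + uint[..L].'+')
--     space O(L*log2(L))*bit
--         for both space(output) and working space
--
-- example:
--     >>> this = array_to_idx2left_biased_rmq_control_range
--     >>> that = array_to_idx2left_biased_rmq_control_range__ver1
--     >>> def test(array):
--     ...     r = this(array)
--     ...     if r == that(array): return r
--     ...     return AssertionError
--
--     >>> test('')
--     []
--     >>> test('1')
--     [(0, 1)]
--     >>> test('12')
--     [(0, 2), (1, 2)]
--     >>> test('21')
--     [(0, 1), (0, 2)]
--     >>> test('123')
--     [(0, 3), (1, 3), (2, 3)]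
--     >>> test('132')
--     [(0, 3), (1, 2), (1, 3)]
--     >>> test('213')
--     [(0, 1), (0, 3), (2, 3)]
--     >>> test('231')
--     [(0, 2), (1, 2), (0, 3)]
--     >>> test('312')
--     [(0, 1), (0, 3), (2, 3)]
--     >>> test('321')
--     [(0, 1), (0, 2), (0, 3)]
-- '''
--     ###################### ver2
--     L = len(array)
--
--     # space O(L*log2(L))*bit
--     idx2begin = []      # assign value when push to stack
--     idx2end = [None]*L  # assign value when pop from stack
--     stack = right_open_roots = []
--     indices = []
--
--     # time O(1)*ops
--     def pop():
--         return indices.pop(), stack.pop()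
--     def push(ix, x):
--         indices.append(ix), stack.append(x)
--
--     # each element push/pop one and only one time
--     # time O(L)*(a."<" + uint[..L-1].'+')
--     for ix, x in enumerate(array): # O(1)*uint[..L-1].'+'
--         iy = None
--         while stack and x < stack[-1]: # O(1)*a."<"
--             # y is x.left_child.right_child*
--             iy, y = pop()
--             idx2end[iy] = ix
--         push(ix, x)
--
--         # y is x.left_child if exist
--         x_begin = ix if iy is None else idx2begin[iy]
--         idx2begin.append(x_begin)
--
--     while stack:
--         iy, y = pop()
--         idx2end[iy] = L
--     return list(zip(idx2begin, idx2end))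
-- ===== SOURCE B (Python) =====
-- def array_to_idx2left_biased_rmq_control_range(array):
--     L = len(array)
--     def begin_(k):
--         i = k
--         while i > 0 and array[i - 1] > array[k]:
--             i -= 1
--         return i
--     def end_(k):
--         j = k + 1
--         while j < L and array[j] >= array[k]:
--             j += 1
--         return j
--     return [(begin_(k), end_(k)) for k in range(L)]
-- ===== Notes on version B (the rewrite author's own statement) =====
-- stated objective: simpler
-- what changed: replaces the single monotonic-stack pass (parallel index/value stacks, deferred end-assignment, begin inherited from the last popped entry) with two independent per-index while-loop scans that read each control boundary directly off the array
import Mathlib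
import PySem

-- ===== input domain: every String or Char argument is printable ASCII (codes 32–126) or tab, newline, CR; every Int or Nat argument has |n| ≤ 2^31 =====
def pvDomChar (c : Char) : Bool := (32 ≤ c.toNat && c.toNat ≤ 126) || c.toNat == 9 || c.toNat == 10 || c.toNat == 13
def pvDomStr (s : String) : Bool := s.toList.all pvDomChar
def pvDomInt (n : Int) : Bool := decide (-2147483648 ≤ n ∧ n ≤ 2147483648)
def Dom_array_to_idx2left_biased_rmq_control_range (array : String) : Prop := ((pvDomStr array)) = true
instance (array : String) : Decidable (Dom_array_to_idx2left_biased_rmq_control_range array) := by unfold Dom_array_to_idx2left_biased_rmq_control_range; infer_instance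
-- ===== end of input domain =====

-- B replaces A's single monotonic-stack pass by two independent per-index while-loop
-- scans (simpler to read; O(L^2) instead of A's O(L)).  Return values proved equal.

-- ===== PORT A =====
-- state of A's loop: (idx2begin, idx2end, indices, stack); indices are Python ints
-- that are provably nonnegative, carried as Nat and cast to Int in the final zip.
structure RmqSt where
  idx2begin : List Nat
  idx2end   : List (Option Nat)
  indices   : List Nat
  stack     : List Char

-- 'while stack and x < stack[-1]: iy, y = pop(); idx2end[iy] = ix' (list top = head here);
-- also returns the last popped index iy (None if no pop happened).
def popA (x : Char) (ix : Nat) :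
    List Nat → List Char → List (Option Nat) → Option Nat →
    List Nat × List Char × List (Option Nat) × Option Nat
  | iy :: is, y :: st, e, cur =>
    if x < y then popA x ix is st (e.set iy (some ix)) (some iy)
    else (iy :: is, y :: st, e, cur)
  | is, st, e, cur => (is, st, e, cur)

-- body of 'for ix, x in enumerate(array)'
def stepA (ix : Nat) (x : Char) : RmqSt → RmqSt
  | ⟨b, e, is, st⟩ =>
    let r := popA x ix is st e none
    let xb := match r.2.2.2 with
      | none => ix                 -- x_begin = ix if iy is None
      | some iy => b.getD iy 0     -- else idx2begin[iy]  (iy always in range)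
    ⟨b ++ [xb], r.2.2.1, ix :: r.1, x :: r.2.1⟩

-- the 'for ix, x in enumerate(array)' loop itself, ix the running index
def runA : Nat → List Char → RmqSt → RmqSt
  | _, [], s => s
  | ix, x :: xs, s => runA (ix + 1) xs (stepA ix x s)

-- trailing 'while stack: iy, y = pop(); idx2end[iy] = L'
def drainA (L : Nat) : List Nat → List (Option Nat) → List (Option Nat)
  | [], e => e
  | iy :: is, e => drainA L is (e.set iy (some L))

def array_to_idx2left_biased_rmq_control_range (array : String) : List (Int × Int) :=
  let l := array.toList
  let L := l.length
  let s := runA 0 l ⟨[], List.replicate L none, [], []⟩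
  let e := drainA L s.indices s.idx2end
  -- list(zip(idx2begin, idx2end)); every idx2end slot is 'some' by now, '.getD 0' only coerces
  (s.idx2begin.zip e).map (fun p => ((p.1 : Int), ((p.2.getD 0 : Nat) : Int)))

-- ===== PORT B =====
-- 'j = k+1; while j < L and array[j] >= array[k]: j += 1; return j'
def endGo (l : List Char) (c : Char) (j : Nat) : Nat :=
  if _h : j < l.length then
    if c ≤ l.getD j default then endGo l c (j + 1) else j
  else j
termination_by l.length - j

-- 'i = k; while i > 0 and array[i-1] > array[k]: i -= 1; return i'
def beginGo (l : List Char) (c : Char) : Nat → Nat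
  | 0 => 0
  | i + 1 => if c < l.getD i default then beginGo l c i else i + 1

def array_to_idx2left_biased_rmq_control_range_alt (array : String) : List (Int × Int) :=
  let l := array.toList
  (List.range l.length).map fun k =>
    ((beginGo l (l.getD k default) k : Int), (endGo l (l.getD k default) (k + 1) : Int))

-- ===== PRECONDITION & SPEC =====
def Spec_array_to_idx2left_biased_rmq_control_range (array : String) (out : List (Int × Int)) : Prop := out = array_to_idx2left_biased_rmq_control_range_alt array
instance (array : String) (out : List (Int × Int)) : Decidable (Spec_array_to_idx2left_biased_rmq_control_range array out) := by unfold Spec_array_to_idx2left_biased_rmq_control_range; infer_instance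

-- ===== CLAIM (what is proved, stated in full; the proofs are below) =====
def Claim_equal_array_to_idx2left_biased_rmq_control_range : Prop := ∀ (array : String), Dom_array_to_idx2left_biased_rmq_control_range array → Spec_array_to_idx2left_biased_rmq_control_range array (array_to_idx2left_biased_rmq_control_range array)

-- ===== LEMMAS AND PROOFS =====

-- abbreviations for B's two boundaries
def Ee (l : List Char) (k : Nat) : Nat := endGo l (l.getD k default) (k + 1)
def Bg (l : List Char) (k : Nat) : Nat := beginGo l (l.getD k default) k

-- ---- characterisation of endGo ----
theorem endGo_ge (l : List Char) (c : Char) (j : Nat) : j ≤ endGo l c j := by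
  fun_induction endGo l c j with
  | case1 j h hc ih => omega
  | case2 j h hc => exact le_rfl
  | case3 j h => exact le_rfl

theorem endGo_le (l : List Char) (c : Char) (j : Nat) (h : j ≤ l.length) :
    endGo l c j ≤ l.length := by
  fun_induction endGo l c j with
  | case1 j hj hc ih => exact ih (by omega)
  | case2 j hj hc => omega
  | case3 j hj => omega

theorem endGo_mid (l : List Char) (c : Char) (j : Nat) :
    ∀ t, j ≤ t → t < endGo l c j → ¬ l.getD t default < c := by
  fun_induction endGo l c j with
  | case1 j hj hc ih =>
    intro t ht1 ht2
    rcases Nat.eq_or_lt_of_le ht1 with h' | h'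
    · subst h'; exact not_lt.mpr hc
    · exact ih t h' ht2
  | case2 j hj hc => intro t ht1 ht2; omega
  | case3 j hj => intro t ht1 ht2; omega

theorem endGo_stop (l : List Char) (c : Char) (j : Nat) (h : j ≤ l.length) :
    endGo l c j = l.length ∨ l.getD (endGo l c j) default < c := by
  fun_induction endGo l c j with
  | case1 j hj hc ih => exact ih (by omega)
  | case2 j hj hc => exact Or.inr (lt_of_not_ge hc)
  | case3 j hj => omega

theorem endGo_eq (l : List Char) (c : Char) :
    ∀ j m : Nat, j ≤ m → m ≤ l.length →
    (∀ t, j ≤ t → t < m → ¬ l.getD t default < c) →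
    (m = l.length ∨ l.getD m default < c) →
    endGo l c j = m := by
  intro j m hjm hmL hmid hstop
  rcases Nat.lt_trichotomy (endGo l c j) m with h | h | h
  · exfalso
    have h1 := hmid (endGo l c j) (endGo_ge l c j) h
    rcases endGo_stop l c j (by omega) with h2 | h2
    · omega
    · exact h1 h2
  · exact h
  · exfalso
    have h1 := endGo_mid l c j m hjm h
    rcases hstop with h2 | h2
    · have := endGo_le l c j (by omega); omega
    · exact h1 h2

-- ---- characterisation of beginGo ----
theorem beginGo_le (l : List Char) (c : Char) (k : Nat) : beginGo l c k ≤ k := by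
  induction k with
  | zero => rw [beginGo]
  | succ i ih =>
    rw [beginGo]
    split
    · omega
    · omega

theorem beginGo_mid (l : List Char) (c : Char) (k : Nat) :
    ∀ t, beginGo l c k ≤ t → t < k → c < l.getD t default := by
  induction k with
  | zero => intro t h1 h2; omega
  | succ i ih =>
    intro t h1 h2
    rw [beginGo] at h1
    by_cases hc : c < l.getD i default
    · rw [if_pos hc] at h1
      rcases Nat.lt_or_ge t i with h' | h'
      · exact ih t h1 h'
      · have : t = i := by omega
        subst this; exact hc
    · rw [if_neg hc] at h1; omega

theorem beginGo_eq (l : List Char) (c : Char) :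
    ∀ k i : Nat, i ≤ k →
    (∀ t, i ≤ t → t < k → c < l.getD t default) →
    (i = 0 ∨ ¬ c < l.getD (i - 1) default) →
    beginGo l c k = i := by
  intro k
  induction k with
  | zero => intro i h1 _ _; rw [beginGo]; omega
  | succ m ih =>
    intro i h1 hmid hstop
    rw [beginGo]
    rcases Nat.eq_or_lt_of_le h1 with h' | h'
    · subst h'
      have : ¬ c < l.getD m default := by
        rcases hstop with h2 | h2
        · omega
        · simpa using h2
      rw [if_neg this]
    · have hc : c < l.getD m default := hmid m (by omega) (by omega)
      rw [if_pos hc]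
      exact ih i (by omega) (fun t ht1 ht2 => hmid t ht1 (by omega)) hstop

-- ---- the chain property of the stack ----
def chainOK (l : List Char) : List Nat → Prop
  | [] => True
  | [i] => Bg l i = 0
  | i :: j :: rest => Bg l i = j + 1 ∧ chainOK l (j :: rest)

theorem chainOK_cons2 (l : List Char) (i j : Nat) (rest : List Nat)
    (h : chainOK l (i :: j :: rest)) : chainOK l (j :: rest) := h.2

theorem chainOK_append_right (l : List Char) :
    ∀ tw dw : List Nat, chainOK l (tw ++ dw) → chainOK l dw := by
  intro tw
  induction tw with
  | nil => intro dw h; simpa using h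
  | cons p tw' ih =>
    intro dw h
    apply ih
    rw [List.cons_append] at h
    cases hE : tw' ++ dw with
    | nil => trivial
    | cons y r => exact chainOK_cons2 l p y r (hE ▸ h)

theorem chainOK_break (l : List Char) :
    ∀ (tw dw : List Nat) (h : tw ≠ []), chainOK l (tw ++ dw) →
    (dw = [] ∧ Bg l (tw.getLast h) = 0) ∨
    (∃ d dw', dw = d :: dw' ∧ Bg l (tw.getLast h) = d + 1) := by
  intro tw
  induction tw with
  | nil => intro dw h; exact absurd rfl h
  | cons p tw' ih =>
    intro dw h hch
    cases tw' with
    | nil =>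
      simp only [List.getLast_singleton]
      cases dw with
      | nil => exact Or.inl ⟨rfl, by simpa [chainOK] using hch⟩
      | cons d dw' =>
        rw [List.cons_append, List.nil_append] at hch
        exact Or.inr ⟨d, dw', rfl, hch.1⟩
    | cons q tw'' =>
      rw [List.getLast_cons (by simp)]
      rw [List.cons_append] at hch
      exact ih dw (by simp) (chainOK_cons2 l p q (tw'' ++ dw) hch)

-- ---- pop loop closed form ----
def lastO (cur : Option Nat) : List Nat → Option Nat
  | [] => cur
  | p :: ps => lastO (some p) ps

theorem lastO_cons (p : Nat) (tws : List Nat) (cur : Option Nat) :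
    lastO cur (p :: tws) = some ((p :: tws).getLast (List.cons_ne_nil _ _)) := by
  induction tws generalizing p cur with
  | nil => rfl
  | cons q tws' ih =>
    rw [List.getLast_cons (by simp)]
    show lastO (some p) (q :: tws') = _
    exact ih q (some p)

theorem popA_eq (l : List Char) (x : Char) (ix : Nat) :
    ∀ (is : List Nat) (e : List (Option Nat)) (cur : Option Nat),
    popA x ix is (is.map (fun i => l.getD i default)) e cur =
      (is.dropWhile (fun p => decide (x < l.getD p default)),
       (is.dropWhile (fun p => decide (x < l.getD p default))).map (fun i => l.getD i default),
       (is.takeWhile (fun p => decide (x < l.getD p default))).foldl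
         (fun e p => e.set p (some ix)) e,
       lastO cur (is.takeWhile (fun p => decide (x < l.getD p default)))) := by
  intro is
  induction is with
  | nil => intro e cur; rfl
  | cons p is' ih =>
    intro e cur
    by_cases hp : x < l.getD p default
    · simp only [List.map_cons, popA, if_pos hp, List.takeWhile_cons, List.dropWhile_cons,
        hp, decide_true, List.foldl_cons]
      exact ih (e.set p (some ix)) (some p)
    · simp only [List.map_cons, popA, if_neg hp, List.takeWhile_cons, List.dropWhile_cons,
        hp, decide_false, List.foldl_cons]
      rfl

theorem getD_set' (e : List (Option Nat)) (i j : Nat) (a : Option Nat) (h : i < e.length) :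
    (e.set i a).getD j none = if i = j then a else e.getD j none := by
  by_cases hij : i = j
  · subst hij; simp [List.getD_eq_getElem?_getD, List.getElem?_set, h]
  · simp [List.getD_eq_getElem?_getD, List.getElem?_set, hij]

theorem getD_foldl_set (ix : Nat) :
    ∀ (tw : List Nat) (e : List (Option Nat)) (i : Nat), (∀ p ∈ tw, p < e.length) →
    (tw.foldl (fun e p => e.set p (some ix)) e).getD i none =
      if i ∈ tw then some ix else e.getD i none := by
  intro tw
  induction tw with
  | nil => intro e i _; simp
  | cons p tw' ih =>
    intro e i hlen
    rw [List.foldl_cons, ih _ i (by intro q hq; rw [List.length_set]; exact hlen q (by simp [hq]))]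
    rw [getD_set' e p i (some ix) (hlen p (by simp))]
    by_cases h1 : i ∈ tw'
    · simp [h1]
    · by_cases h2 : p = i
      · subst h2; simp [h1]
      · simp [h1, h2, Ne.symm h2]

theorem length_foldl_set (ix : Nat) :
    ∀ (tw : List Nat) (e : List (Option Nat)),
    (tw.foldl (fun e p => e.set p (some ix)) e).length = e.length := by
  intro tw
  induction tw with
  | nil => intro e; rfl
  | cons p tw' ih => intro e; rw [List.foldl_cons, ih, List.length_set]

-- membership in take/dropWhile on a value-sorted stack
theorem mem_takeWhile_sorted (l : List Char) (x : Char) :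
    ∀ is : List Nat,
    is.Pairwise (fun p q => q < p ∧ l.getD q default ≤ l.getD p default) →
    ∀ i, (i ∈ is.takeWhile (fun p => decide (x < l.getD p default)) ↔
           i ∈ is ∧ x < l.getD i default) ∧
         (i ∈ is.dropWhile (fun p => decide (x < l.getD p default)) ↔
           i ∈ is ∧ ¬ x < l.getD i default) := by
  intro is
  induction is with
  | nil => intro _ i; simp
  | cons p is' ih =>
    intro hpw i
    rw [List.pairwise_cons] at hpw
    have ihi := ih hpw.2 i
    by_cases hp : x < l.getD p default
    · rw [List.takeWhile_cons, List.dropWhile_cons]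
      simp only [hp, decide_true, if_true]
      constructor
      · simp only [List.mem_cons, ihi.1]
        constructor
        · rintro (h | ⟨h1, h2⟩)
          · exact ⟨Or.inl h, h ▸ hp⟩
          · exact ⟨Or.inr h1, h2⟩
        · rintro ⟨h1 | h1, h2⟩
          · exact Or.inl h1
          · exact Or.inr ⟨h1, h2⟩
      · rw [ihi.2]
        constructor
        · rintro ⟨h1, h2⟩; exact ⟨List.mem_cons_of_mem _ h1, h2⟩
        · intro h3
          rcases List.mem_cons.mp h3.1 with h1 | h1
          · exact absurd (h1 ▸ hp) h3.2
          · exact ⟨h1, h3.2⟩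
    · rw [List.takeWhile_cons, List.dropWhile_cons]
      simp only [hp, decide_false, if_false]
      have hall : ∀ q ∈ p :: is', ¬ x < l.getD q default := by
        intro q hq
        rcases List.mem_cons.mp hq with h | h
        · exact h ▸ hp
        · intro hx; exact hp (lt_of_lt_of_le hx (hpw.1 q h).2)
      constructor
      · exact iff_of_false (by simp) (fun h => (hall i h.1) h.2)
      · constructor
        · intro h1; exact ⟨h1, hall i h1⟩
        · rintro ⟨h1, _⟩; exact h1

-- coverage: every position from Bg(last popped) up to the old top is > x
theorem cover (l : List Char) (x : Char) :
    ∀ (tws : List Nat) (p : Nat) (rest : List Nat),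
    chainOK l (p :: tws ++ rest) →
    x < l.getD p default →
    (∀ q ∈ tws, x < l.getD q default) →
    ∀ t, Bg l ((p :: tws).getLast (List.cons_ne_nil _ _)) ≤ t → t < p + 1 →
      x < l.getD t default := by
  intro tws
  induction tws with
  | nil =>
    intro p rest _ hp _ t h1 h2
    simp only [List.getLast_singleton] at h1
    rcases Nat.lt_or_ge t p with h' | h'
    · exact lt_trans hp (beginGo_mid l _ p t h1 h')
    · have : t = p := by omega
      subst this; exact hp
  | cons q tws' ih =>
    intro p rest hch hp hq t h1 h2
    rw [List.cons_append] at hch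
    have hBp : Bg l p = q + 1 := hch.1
    rw [List.getLast_cons (by simp)] at h1
    rcases Nat.lt_or_ge t (q + 1) with h' | h'
    · exact ih q rest (chainOK_cons2 l p q (tws' ++ rest) hch)
        (hq q (by simp)) (fun r hr => hq r (by simp [hr])) t h1 h'
    · have hBp' : beginGo l (l.getD p default) p = q + 1 := hBp
      rcases Nat.lt_or_ge t p with h'' | h''
      · exact lt_trans hp (beginGo_mid l _ p t (by omega) h'')
      · have : t = p := by omega
        subst this; exact hp

-- ---- the loop invariant ----
def StInv (l : List Char) (n : Nat) (s : RmqSt) : Prop :=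
  s.stack = s.indices.map (fun i => l.getD i default) ∧
  s.idx2begin.length = n ∧
  (∀ k, k < n → s.idx2begin.getD k 0 = Bg l k) ∧
  s.idx2end.length = l.length ∧
  (∀ i, s.idx2end.getD i none = if i < n ∧ Ee l i < n then some (Ee l i) else none) ∧
  s.indices.Pairwise (fun p q => q < p ∧ l.getD q default ≤ l.getD p default) ∧
  (∀ i, i ∈ s.indices ↔ (i < n ∧ ∀ t, i < t → t < n → ¬ l.getD t default < l.getD i default)) ∧
  chainOK l s.indices

theorem stepA_inv (l : List Char) (n : Nat) (s : RmqSt) (hn : n < l.length)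
    (h : StInv l n s) : StInv l (n + 1) (stepA n (l.getD n default) s) := by
  obtain ⟨b, e, is, st⟩ := s
  obtain ⟨h1, h2, h3, h4, h5, h6, h7, h8⟩ := h
  simp only at h1 h2 h3 h4 h5 h6 h7 h8
  subst h1
  rw [show stepA n (l.getD n default) ⟨b, e, is, is.map (fun i => l.getD i default)⟩
      = let r := popA (l.getD n default) n is (is.map (fun i => l.getD i default)) e none
        let xb := match r.2.2.2 with
          | none => n
          | some iy => b.getD iy 0
        ⟨b ++ [xb], r.2.2.1, n :: r.1, l.getD n default :: r.2.1⟩ from rfl]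
  rw [popA_eq l (l.getD n default) n is e none]
  set x := l.getD n default with hxdef
  set tw := is.takeWhile (fun p => decide (x < l.getD p default)) with htw
  set dw := is.dropWhile (fun p => decide (x < l.getD p default)) with hdw
  have htd : tw ++ dw = is := List.takeWhile_append_dropWhile
  have hmem := mem_takeWhile_sorted l x is h6
  have hmemtw : ∀ i, i ∈ tw ↔ i ∈ is ∧ x < l.getD i default := fun i => (hmem i).1
  have hmemdw : ∀ i, i ∈ dw ↔ i ∈ is ∧ ¬ x < l.getD i default := fun i => (hmem i).2
  have hsub : ∀ i ∈ is, i < n := fun i hi => ((h7 i).mp hi).1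
  have hhead : ∀ p is', is = p :: is' → p + 1 = n := by
    intro p is' hE
    have hpn : p < n := hsub p (by rw [hE]; simp)
    have hmem1 : n - 1 ∈ is := (h7 (n - 1)).mpr ⟨by omega, by intro t ht1 ht2; omega⟩
    rw [hE] at hmem1
    rcases List.mem_cons.mp hmem1 with hh | hh
    · omega
    · have h6' := h6
      rw [hE, List.pairwise_cons] at h6'
      have := (h6'.1 _ hh).1
      omega
  have hEtw : ∀ i ∈ tw, Ee l i = n := by
    intro i hi
    obtain ⟨hiis, hxi⟩ := (hmemtw i).mp hi
    obtain ⟨hin, halv⟩ := (h7 i).mp hiis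
    exact endGo_eq l _ (i + 1) n (by omega) (by omega)
      (fun t ht1 ht2 => halv t (by omega) ht2) (Or.inr hxi)
  have hmain : Bg l n = (match lastO none tw with
        | none => n
        | some iy => b.getD iy 0) ∧ chainOK l (n :: dw) := by
    cases htwE : tw with
    | nil =>
      have hdweq : dw = is := by rw [← htd, htwE, List.nil_append]
      cases hisE : is with
      | nil =>
        have hn0 : n = 0 := by
          by_contra hne
          have hmm : n - 1 ∈ is := (h7 (n - 1)).mpr ⟨by omega, by intro t ht1 ht2; omega⟩
          rw [hisE] at hmm
          simp at hmm
        constructor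
        · show Bg l n = n
          subst hn0
          rfl
        · rw [hdweq, hisE]
          subst hn0
          show Bg l 0 = 0
          rfl
      | cons p is' =>
        have hp1 : p + 1 = n := hhead p is' hisE
        have hnp : ¬ x < l.getD p default := by
          intro hx
          have hptw : p ∈ tw := (hmemtw p).mpr ⟨by rw [hisE]; simp, hx⟩
          rw [htwE] at hptw
          simp at hptw
        have hBgn : Bg l n = n := by
          show beginGo l x n = n
          rw [← hp1, beginGo, if_neg hnp]
        constructor
        · exact hBgn
        · rw [hdweq, hisE]
          show Bg l n = p + 1 ∧ chainOK l (p :: is')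
          refine ⟨by rw [hBgn, hp1], ?_⟩
          rw [← hisE]
          exact h8
    | cons p tws =>
      have hlo := lastO_cons p tws none
      have hiytw : (p :: tws).getLast (List.cons_ne_nil _ _) ∈ tw := by
        rw [htwE]; exact List.getLast_mem _
      obtain ⟨hiyis, hiyx⟩ := (hmemtw _).mp hiytw
      have hiyn : (p :: tws).getLast (List.cons_ne_nil _ _) < n := hsub _ hiyis
      have hch : chainOK l (p :: (tws ++ dw)) := by
        have h8' := h8
        rw [← htd, htwE, List.cons_append] at h8'
        exact h8'
      have hpn : p + 1 = n := by
        apply hhead p (tws ++ dw)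
        rw [← htd, htwE, List.cons_append]
      have hptw : p ∈ tw := by rw [htwE]; simp
      have hpx : x < l.getD p default := ((hmemtw p).mp hptw).2
      have hqx : ∀ q ∈ tws, x < l.getD q default := by
        intro q hq
        exact ((hmemtw q).mp (by rw [htwE]; simp [hq])).2
      have hcov := cover l x tws p dw hch hpx hqx
      have hstop := chainOK_break l (p :: tws) dw (by simp)
        (by rw [List.cons_append]; exact hch)
      have hBgiy_le : Bg l ((p :: tws).getLast (List.cons_ne_nil _ _)) ≤
          (p :: tws).getLast (List.cons_ne_nil _ _) := beginGo_le l _ _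
      have hBgn : Bg l n = Bg l ((p :: tws).getLast (List.cons_ne_nil _ _)) := by
        show beginGo l x n = _
        apply beginGo_eq l x n _ (by omega)
        · intro t ht1 ht2
          exact hcov t ht1 (by omega)
        · rcases hstop with ⟨hdwnil, hbg0⟩ | ⟨d, dw', hdweq, hbgd⟩
          · exact Or.inl hbg0
          · right
            rw [hbgd]
            simp only [Nat.add_sub_cancel]
            have hddw : d ∈ dw := by rw [hdweq]; simp
            exact ((hmemdw d).mp hddw).2
      constructor
      · rw [hlo]
        show Bg l n = b.getD _ 0
        rw [hBgn, h3 _ hiyn]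
      · rcases hstop with ⟨hdwnil, hbg0⟩ | ⟨d, dw', hdweq, hbgd⟩
        · rw [hdwnil]
          show Bg l n = 0
          rw [hBgn]; exact hbg0
        · rw [hdweq]
          show Bg l n = d + 1 ∧ chainOK l (d :: dw')
          refine ⟨by rw [hBgn]; exact hbgd, ?_⟩
          rw [← hdweq]
          exact chainOK_append_right l (p :: tws) dw (by rw [List.cons_append]; exact hch)
  refine ⟨?_, ?_, ?_, ?_, ?_, ?_, ?_, ?_⟩
  · -- stack
    show x :: dw.map (fun i => l.getD i default) = (n :: dw).map (fun i => l.getD i default)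
    rw [List.map_cons]
  · -- begin length
    show (b ++ [_]).length = n + 1
    simp [h2]
  · -- begin values
    intro k hk
    show (b ++ [_]).getD k 0 = Bg l k
    rcases Nat.lt_or_ge k n with h' | h'
    · rw [List.getD_eq_getElem?_getD, List.getElem?_append_left (by omega : k < b.length),
        ← List.getD_eq_getElem?_getD]
      exact h3 k h'
    · have hkn : k = n := by omega
      subst hkn
      rw [List.getD_eq_getElem?_getD, List.getElem?_append_right (by omega : b.length ≤ k), h2]
      simp only [Nat.sub_self, List.getElem?_cons_zero, Option.getD_some]
      exact hmain.1.symm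
  · -- end length
    show (tw.foldl (fun e p => e.set p (some n)) e).length = l.length
    rw [length_foldl_set, h4]
  · -- end values
    show ∀ i, (tw.foldl (fun e p => e.set p (some n)) e).getD i none = _
    intro i
    have hlen' : ∀ p ∈ tw, p < e.length := by
      intro p hp
      have := hsub p ((hmemtw p).mp hp).1
      omega
    rw [getD_foldl_set n tw e i hlen']
    by_cases hitw : i ∈ tw
    · rw [if_pos hitw]
      have hEi : Ee l i = n := hEtw i hitw
      have hin : i < n := hsub i ((hmemtw i).mp hitw).1
      rw [if_pos ⟨by omega, by omega⟩, hEi]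
    · rw [if_neg hitw, h5 i]
      by_cases hc : i < n ∧ Ee l i < n
      · rw [if_pos hc, if_pos ⟨by omega, by omega⟩]
      · rw [if_neg hc]
        by_cases hc2 : i < n + 1 ∧ Ee l i < n + 1
        · exfalso
          have hEe' : endGo l (l.getD i default) (i + 1) = Ee l i := rfl
          have hEge : i + 1 ≤ Ee l i := endGo_ge l _ (i + 1)
          have hin : i < n := by omega
          have hEeq : Ee l i = n := by omega
          apply hitw
          refine (hmemtw i).mpr ⟨(h7 i).mpr ⟨hin, ?_⟩, ?_⟩
          · intro t ht1 ht2
            exact endGo_mid l _ (i + 1) t (by omega) (by omega)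
          · rcases endGo_stop l (l.getD i default) (i + 1) (by omega) with hs | hs
            · change Ee l i = l.length at hs
              omega
            · change l.getD (Ee l i) default < l.getD i default at hs
              rw [hEeq] at hs
              exact hs
        · rw [if_neg hc2]
  · -- pairwise
    show (n :: dw).Pairwise _
    rw [List.pairwise_cons]
    constructor
    · intro q hq
      obtain ⟨hqis, hqx⟩ := (hmemdw q).mp hq
      exact ⟨hsub q hqis, not_lt.mp hqx⟩
    · exact h6.sublist (List.dropWhile_sublist _)
  · -- membership
    show ∀ i, i ∈ n :: dw ↔ _
    intro i
    constructor
    · intro hi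
      rcases List.mem_cons.mp hi with hh | hh
      · subst hh; exact ⟨by omega, by intro t ht1 ht2; omega⟩
      · obtain ⟨hiis, hix⟩ := (hmemdw i).mp hh
        obtain ⟨hin, halv⟩ := (h7 i).mp hiis
        refine ⟨by omega, ?_⟩
        intro t ht1 ht2
        rcases Nat.lt_or_ge t n with h' | h'
        · exact halv t ht1 h'
        · have : t = n := by omega
          subst this
          intro hlt; exact hix hlt
    · rintro ⟨hin, halv⟩
      rcases Nat.lt_or_ge i n with h' | h'
      · refine List.mem_cons_of_mem _ ((hmemdw i).mpr ⟨(h7 i).mpr ⟨h', ?_⟩, ?_⟩)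
        · intro t ht1 ht2; exact halv t ht1 (by omega)
        · exact halv n h' (by omega)
      · have : i = n := by omega
        subst this; exact List.mem_cons_self
  · -- chain
    exact hmain.2

theorem runA_inv (l : List Char) :
    ∀ (n : Nat) (s : RmqSt), n ≤ l.length → StInv l n s →
    StInv l l.length (runA n (l.drop n) s) := by
  intro n s hn h
  induction hd : l.length - n generalizing n s with
  | zero =>
    have hnL : n = l.length := by omega
    subst hnL
    rw [List.drop_length]
    simpa [runA] using h
  | succ d ih =>
    have hnL : n < l.length := by omega
    rw [List.drop_eq_getElem_cons hnL, runA]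
    have hx : l[n] = l.getD n default := (List.getD_eq_getElem l default hnL).symm
    rw [hx]
    exact ih (n + 1) _ (by omega) (stepA_inv l n s hnL h) (by omega)

theorem drainA_getD (L : Nat) :
    ∀ (is : List Nat) (e : List (Option Nat)) (i : Nat), (∀ p ∈ is, p < e.length) →
    (drainA L is e).getD i none = if i ∈ is then some L else e.getD i none := by
  intro is
  induction is with
  | nil => intro e i _; simp [drainA]
  | cons p is' ih =>
    intro e i hlen
    rw [drainA, ih _ i (by intro q hq; rw [List.length_set]; exact hlen q (by simp [hq]))]
    rw [getD_set' e p i (some L) (hlen p (by simp))]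
    by_cases h1 : i ∈ is'
    · simp [h1]
    · by_cases h2 : p = i
      · subst h2; simp [h1]
      · simp [h1, h2, Ne.symm h2]

theorem length_drainA (L : Nat) :
    ∀ (is : List Nat) (e : List (Option Nat)), (drainA L is e).length = e.length := by
  intro is
  induction is with
  | nil => intro e; rfl
  | cons p is' ih => intro e; rw [drainA, ih, List.length_set]

-- ===== VERDICT (by name: the statement is the Claim_ definition above) =====
theorem array_to_idx2left_biased_rmq_control_range_spec : Claim_equal_array_to_idx2left_biased_rmq_control_range := by
  intro array _
  unfold Spec_array_to_idx2left_biased_rmq_control_range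
  show array_to_idx2left_biased_rmq_control_range array = _
  unfold array_to_idx2left_biased_rmq_control_range array_to_idx2left_biased_rmq_control_range_alt
  show ((runA 0 array.toList ⟨[], List.replicate array.toList.length none, [], []⟩).idx2begin.zip
      (drainA array.toList.length
        (runA 0 array.toList ⟨[], List.replicate array.toList.length none, [], []⟩).indices
        (runA 0 array.toList ⟨[], List.replicate array.toList.length none, [], []⟩).idx2end)).map
      (fun p => ((p.1 : Int), ((p.2.getD 0 : Nat) : Int)))
    = (List.range array.toList.length).map (fun k =>
        ((beginGo array.toList (array.toList.getD k default) k : Int),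
         (endGo array.toList (array.toList.getD k default) (k + 1) : Int)))
  set l := array.toList with hl
  have hinit : StInv l 0 ⟨[], List.replicate l.length none, [], []⟩ := by
    refine ⟨rfl, rfl, ?_, ?_, ?_, ?_, ?_, ?_⟩
    · intro k hk; omega
    · simp
    · intro i
      rw [if_neg (by omega)]
      rw [List.getD_eq_getElem?_getD, List.getElem?_replicate]
      split <;> rfl
    · simp
    · intro i; simp
    · trivial
  have hrun := runA_inv l 0 ⟨[], List.replicate l.length none, [], []⟩ (by omega) hinit
  rw [List.drop_zero] at hrun
  obtain ⟨g1, g2, g3, g4, g5, g6, g7, g8⟩ := hrun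
  set s := runA 0 l ⟨[], List.replicate l.length none, [], []⟩ with hs
  have hplen : ∀ p ∈ s.indices, p < s.idx2end.length := by
    intro p hp
    rw [g4]
    exact ((g7 p).mp hp).1
  have he' : ∀ i, i < l.length →
      (drainA l.length s.indices s.idx2end).getD i none = some (Ee l i) := by
    intro i hiL
    rw [drainA_getD l.length s.indices s.idx2end i hplen]
    by_cases hm : i ∈ s.indices
    · rw [if_pos hm]
      obtain ⟨_, halv⟩ := (g7 i).mp hm
      have : Ee l i = l.length :=
        endGo_eq l _ (i + 1) l.length (by omega) le_rfl
          (fun t ht1 ht2 => halv t (by omega) ht2) (Or.inl rfl)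
      rw [this]
    · rw [if_neg hm, g5 i]
      have hEle : Ee l i ≤ l.length := endGo_le l _ (i + 1) (by omega)
      have hEne : Ee l i ≠ l.length := by
        intro hE
        apply hm
        refine (g7 i).mpr ⟨hiL, ?_⟩
        intro t ht1 ht2
        exact endGo_mid l _ (i + 1) t (by omega) (by rw [show endGo l (l.getD i default) (i+1) = Ee l i from rfl, hE]; omega)
      rw [if_pos ⟨hiL, by omega⟩]
  have hlen_e' : (drainA l.length s.indices s.idx2end).length = l.length := by
    rw [length_drainA, g4]
  apply List.ext_getElem
  · simp only [List.length_map, List.length_zip, List.length_range, g2, hlen_e', Nat.min_self]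
  · intro k h1 h2
    simp only [List.getElem_map, List.getElem_zip, List.getElem_range]
    have hkL : k < l.length := by
      simpa using h2
    have hb : s.idx2begin[k]'(by omega) = Bg l k := by
      rw [← List.getD_eq_getElem s.idx2begin 0 (by omega)]
      exact g3 k hkL
    have he : (drainA l.length s.indices s.idx2end)[k]'(by omega) = some (Ee l k) := by
      rw [← List.getD_eq_getElem _ none (by omega)]
      exact he' k hkL
    rw [hb, he]
    rfl
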